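-- pv_equiv track=rewrite | github.com/hyunwoooh5/algo | LeetCode/1529_MinimumSuffixFlips.py | minFlips
-- ===== SOURCE A (Python) =====
-- def minFlips(target: str) -> int:
--     ans = 0
--
--     for i in range(len(target)):
--         if target[i] == '1':
--             if ans % 2 == 0:
--                 ans += 1
--         else:
--             if ans % 2 == 1:
--                 ans += 1
--
--     return ans
-- ===== SOURCE B (Python) =====
-- def minFlips(target: str) -> int:
--     # Count maximal equal runs of '0' + target (non-'1' chars count as '0'), answer = runs - 1.
--     keys = [c == '1' for c in '0' + target]
--     runs = 0
--     i = 0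
--     n = len(keys)
--     while i < n:
--         j = i
--         while j < n and keys[j] == keys[i]:
--             j += 1
--         runs += 1
--         i = j
--     return runs - 1
-- ===== Notes on version B (the rewrite author's own statement) =====
-- stated objective: alternative
-- what changed: Replaces the running parity accumulator with a run-counting pass: prepend a zero character, group the string into maximal equal runs and return the number of runs minus one.
import Mathlib
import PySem

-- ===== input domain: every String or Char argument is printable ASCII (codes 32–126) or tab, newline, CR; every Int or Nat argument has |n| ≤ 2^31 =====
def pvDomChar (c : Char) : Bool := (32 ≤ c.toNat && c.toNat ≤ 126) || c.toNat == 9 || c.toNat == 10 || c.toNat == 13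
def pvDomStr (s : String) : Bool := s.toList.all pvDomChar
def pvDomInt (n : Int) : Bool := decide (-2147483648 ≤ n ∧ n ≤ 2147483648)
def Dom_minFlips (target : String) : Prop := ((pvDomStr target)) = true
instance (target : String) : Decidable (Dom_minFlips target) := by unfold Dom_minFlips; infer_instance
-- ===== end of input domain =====

-- B replaces A's running-parity accumulator by counting maximal equal runs of '0' + target; alternative algorithm, same cost.
-- ===== PORT A =====
def minFlipsLoop : List Char → Int → Int
  | [], ans => ans
  | c :: rest, ans =>
    if c = '1' then
      if ans % 2 = 0 then minFlipsLoop rest (ans + 1) else minFlipsLoop rest ans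
    else
      if ans % 2 = 1 then minFlipsLoop rest (ans + 1) else minFlipsLoop rest ans

def minFlips (target : String) : Int := minFlipsLoop target.toList 0

-- ===== PORT B =====
def runsCount : List Bool → Int
  | [] => 0
  | x :: xs => 1 + runsCount (xs.dropWhile (· == x))
termination_by l => l.length
decreasing_by
  exact Nat.lt_succ_of_le (List.length_dropWhile_le _ _)

def minFlips_alt (target : String) : Int :=
  runsCount ((("0" ++ target).toList).map (fun c => c == '1')) - 1

-- ===== PRECONDITION & SPEC =====
def Spec_minFlips (target : String) (out : Int) : Prop := out = minFlips_alt target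
instance (target : String) (out : Int) : Decidable (Spec_minFlips target out) := by unfold Spec_minFlips; infer_instance

-- ===== CLAIM (what is proved, stated in full; the proofs are below) =====
def Claim_equal_minFlips : Prop := ∀ (target : String), Dom_minFlips target → Spec_minFlips target (minFlips target)

-- ===== LEMMAS AND PROOFS =====

theorem runsCount_nil : runsCount [] = 0 := by simp [runsCount]

theorem runsCount_cons' (x : Bool) (xs : List Bool) :
    runsCount (x :: xs) = 1 + runsCount (xs.dropWhile (· == x)) := by
  rw [runsCount]

/-- Number of changes of value in a boolean list, relative to a previous value. -/
def changes (prev : Bool) : List Bool → Int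
  | [] => 0
  | b :: rest => (if b = prev then 0 else 1) + changes b rest

theorem minFlipsLoop_eq_changes (l : List Char) :
    ∀ (ans : Int) (prev : Bool), ans % 2 = (if prev then 1 else 0) →
      minFlipsLoop l ans = ans + changes prev (l.map (fun c => c == '1')) := by
  induction l with
  | nil => intro ans prev _; simp [minFlipsLoop, changes]
  | cons c rest ih =>
    intro ans prev h
    by_cases hc : c = '1'
    · by_cases hp : prev
      · subst hp
        have : ¬ (ans % 2 = 0) := by simp at h; omega
        simp [minFlipsLoop, hc, this, changes, ih ans true h]
      · have hp' : prev = false := by simpa using hp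
        subst hp'
        have h0 : ans % 2 = 0 := by simpa using h
        have h1 : (ans + 1) % 2 = 1 := by omega
        simp [minFlipsLoop, hc, h0, changes, ih (ans + 1) true (by simpa using h1)]
        ring
    · by_cases hp : prev
      · subst hp
        have h1 : ans % 2 = 1 := by simpa using h
        have h0 : (ans + 1) % 2 = 0 := by omega
        have hcf : (c == '1') = false := by simpa using hc
        simp [minFlipsLoop, hc, h1, changes, hcf, ih (ans + 1) false (by simpa using h0)]
        ring
      · have hp' : prev = false := by simpa using hp
        subst hp'
        have : ¬ (ans % 2 = 1) := by simp at h; omega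
        have hcf : (c == '1') = false := by simpa using hc
        simp [minFlipsLoop, hc, this, changes, hcf, ih ans false h]

theorem changes_eq_runsCount_dropWhile (l : List Bool) :
    ∀ prev : Bool, changes prev l = runsCount (l.dropWhile (· == prev)) := by
  induction l with
  | nil => intro prev; simp [changes, runsCount_nil]
  | cons b rest ih =>
    intro prev
    by_cases hb : b = prev
    · subst hb
      simp [changes, List.dropWhile, ih b]
    · have hne : (b == prev) = false := by simpa using hb
      rw [changes, List.dropWhile]
      simp only [hne, runsCount_cons', ih b]
      by_cases hb' : b <;> by_cases hp' : prev <;> simp_all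

theorem runsCount_cons (prev : Bool) (l : List Bool) :
    runsCount (prev :: l) = 1 + changes prev l := by
  rw [runsCount_cons', changes_eq_runsCount_dropWhile]

-- ===== VERDICT (by name: the statement is the Claim_ definition above) =====
theorem minFlips_spec : Claim_equal_minFlips := by
  intro target _
  unfold Spec_minFlips minFlips minFlips_alt
  have hlist : (("0" ++ target).toList).map (fun c => c == '1')
      = false :: target.toList.map (fun c => c == '1') := by
    simp [String.toList_append]
  rw [hlist, runsCount_cons,
    minFlipsLoop_eq_changes target.toList 0 false (by norm_num)]
  ring
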